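-- pv_equiv track=rewrite | github.com/btrif/Python_dev_repo | Project EULER/pb265 Binary Circles.py | e265_recurse
-- ===== SOURCE A (Python) =====
-- def e265_recurse( S , last , N ):
--    if len(S) == N:
--       return last
--    last *= 2
--    t = last & (N-1)
--    s = 0
--    if t not in S:
--       S.add( t )
--       s += e265_recurse( S, last, N )
--       S.remove( t )
--    t+=1
--    if t not in S:
--       S.add( t )
--       s+=e265_recurse(S, last+1, N)
--       S.remove( t )
--    return s
-- ===== SOURCE B (Python) =====
-- def e265_recurse(S, last, N):
--     total = 0
--     stack = [(frozenset(S), last)]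
--     while stack:
--         cur, l = stack.pop()
--         if len(cur) == N:
--             total += l
--             continue
--         l2 = l * 2
--         t = l2 & (N - 1)
--         if t + 1 not in cur:
--             stack.append((cur | {t + 1}, l2 + 1))
--         if t not in cur:
--             stack.append((cur | {t}, l2))
--     return total
-- ===== Notes on version B (the rewrite author's own statement) =====
-- stated objective: alternative
-- what changed: A's recursive backtracking DFS that mutates one shared set (add before the call, remove after) is replaced by an iterative DFS: a while-loop popping immutable (frozenset, last) frames off an explicit stack and accumulating the sum, with no recursion and no mutation.
-- outside the precondition, e.g. on e265_recurse({4, 5, 6, 7}, 1, 0): A returns 0, B returns 0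
import Mathlib
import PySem

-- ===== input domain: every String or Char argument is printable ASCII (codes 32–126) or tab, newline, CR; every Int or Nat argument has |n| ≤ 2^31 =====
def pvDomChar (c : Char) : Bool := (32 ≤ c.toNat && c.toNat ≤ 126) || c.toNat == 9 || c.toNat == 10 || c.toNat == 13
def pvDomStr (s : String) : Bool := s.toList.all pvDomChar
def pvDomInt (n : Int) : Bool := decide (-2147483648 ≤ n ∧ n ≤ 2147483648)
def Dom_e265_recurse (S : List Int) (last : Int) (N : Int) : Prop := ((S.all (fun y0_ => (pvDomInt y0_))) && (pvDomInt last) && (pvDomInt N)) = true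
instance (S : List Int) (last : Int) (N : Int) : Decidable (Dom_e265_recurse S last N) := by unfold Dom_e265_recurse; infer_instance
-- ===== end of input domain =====

-- B replaces A's recursive backtracking over one mutated set by an iterative DFS over an
-- explicit stack of immutable (set, last) frames; same cost class, no recursion ('alternative').
-- The equivalence is about the RETURN value only: A mutates S during the run (every add is
-- undone by a remove, so S is restored on a normal return, but S is left modified if the
-- recursion aborts with RecursionError); B never mutates S.

-- ===== PORT A =====
-- Transliteration of A's recursion. Python mutates S by S.add(t) … S.remove(t); since t was
-- absent, add-then-remove restores S exactly, so the port passes (S.add t) down and the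
-- original S to the second branch. The Nat fuel only makes the recursion total; under
-- Pre_ (1 ≤ N) the depth is ≤ #([0,N] \ S) + 1 ≤ N.toNat + 2, so fuel never runs out.
def e265_goA : Nat → PySem.Set Int → Int → Int → Int
  | 0, _, _, _ => 0
  | fuel + 1, S, last, N =>
    if PySem.Set.len S = N then last
    else
      let last2 := last * 2
      let t := PySem.Int.band last2 (N - 1)
      let s : Int := 0
      let s := if PySem.Set.contains S t then s
               else s + e265_goA fuel (PySem.Set.add S t) last2 N
      let s := if PySem.Set.contains S (t + 1) then s
               else s + e265_goA fuel (PySem.Set.add S (t + 1)) (last2 + 1) N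
      s

def e265_recurse (S : List Int) (last : Int) (N : Int) : Int :=
  e265_goA (N.toNat + 2) (PySem.Set.ofList S) last N

-- ===== PORT B =====
-- Transliteration of Source B: a while-loop popping (set, last) frames off a stack, pushing the
-- t+1 child before the t child (so t is explored first) and accumulating `total`.
-- Each Lean frame additionally carries a Nat fuel (children get one less), purely as a
-- totality guard; under Pre_ the starting fuel N.toNat + 2 bounds the frame depth.
def e265_goB : List (Nat × PySem.Set Int × Int) → Int → Int → Int
  | [], total, _ => total
  | (0, _, _) :: rest, total, N => e265_goB rest total N
  | (fuel + 1, cur, l) :: rest, total, N =>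
    if PySem.Set.len cur = N then e265_goB rest (total + l) N
    else
      let l2 := l * 2
      let t := PySem.Int.band l2 (N - 1)
      if PySem.Set.contains cur t then
        if PySem.Set.contains cur (t + 1) then e265_goB rest total N
        else e265_goB ((fuel, PySem.Set.add cur (t + 1), l2 + 1) :: rest) total N
      else
        if PySem.Set.contains cur (t + 1) then
          e265_goB ((fuel, PySem.Set.add cur t, l2) :: rest) total N
        else
          e265_goB ((fuel, PySem.Set.add cur t, l2) ::
                    (fuel, PySem.Set.add cur (t + 1), l2 + 1) :: rest) total N
  termination_by stack _ _ => (stack.map (fun fr => 3 ^ fr.1)).sum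
  decreasing_by
    all_goals simp only [List.map_cons, List.sum_cons]
    all_goals (try have h1 : 1 ≤ 3 ^ fuel := Nat.one_le_pow _ _ (by omega))
    all_goals (try simp only [pow_succ])
    all_goals omega

def e265_recurse_alt (S : List Int) (last : Int) (N : Int) : Int :=
  e265_goB [(N.toNat + 2, PySem.Set.ofList S, last)] 0 N

-- ===== PRECONDITION & SPEC =====
-- Pre_ admits every N ≥ 1 and, for N ≤ 0, the immediate returns (len(S) == N at entry, or
-- both first candidates already in S); on the other N ≤ 0 inputs the candidate values are no
-- longer confined to [0, N] and the recursion usually diverges (RecursionError), though a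
-- shallow search can still return there — those rare returns are also excluded.
def Pre_e265_recurse (S : List Int) (last : Int) (N : Int) : Prop :=
  1 ≤ N ∨ PySem.Set.len (PySem.Set.ofList S) = N ∨
    (PySem.Int.band (2 * last) (N - 1) ∈ S ∧ PySem.Int.band (2 * last) (N - 1) + 1 ∈ S)
instance (S : List Int) (last : Int) (N : Int) : Decidable (Pre_e265_recurse S last N) := by
  unfold Pre_e265_recurse; infer_instance

def pvWitness_e265_recurse : List Int × Int × Int := ([0], 0, 2)

def Spec_e265_recurse (S : List Int) (last : Int) (N : Int) (out : Int) : Prop := out = e265_recurse_alt S last N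
instance (S : List Int) (last : Int) (N : Int) (out : Int) : Decidable (Spec_e265_recurse S last N out) := by unfold Spec_e265_recurse; infer_instance

-- ===== CLAIM (what is proved, stated in full; the proofs are below) =====
def Claim_equal_e265_recurse : Prop := ∀ (S : List Int) (last : Int) (N : Int), Dom_e265_recurse S last N → Pre_e265_recurse S last N → Spec_e265_recurse S last N (e265_recurse S last N)

-- ===== LEMMAS AND PROOFS =====

-- Python's a & b for 0 ≤ b lies in [0, b] (two's-complement mask).
theorem pvBand_bounds (a b : Int) (hb : 0 ≤ b) :
    0 ≤ PySem.Int.band a b ∧ PySem.Int.band a b ≤ b := by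
  unfold PySem.Int.band
  have ha := Nat.and_le_right (n := a.toNat) (m := b.toNat)
  have hz := Nat.sub_le b.toNat (b.toNat &&& (-a - 1).toNat)
  split_ifs <;> omega

-- Elements of [0, N] missing from the set: the decreasing measure of the recursion.
def pvMissing (S : PySem.Set Int) (N : Int) : Nat :=
  ((List.range (N.toNat + 1)).filter (fun x : Nat => !decide ((x : Int) ∈ S))).length

theorem pvMissing_le (S : PySem.Set Int) (N : Int) : pvMissing S N ≤ N.toNat + 1 := by
  simpa [pvMissing] using List.length_filter_le _ (List.range (N.toNat + 1))

theorem pvMissing_aux (S : PySem.Set Int) (t : Int) (ht : t ∉ S) (h0 : 0 ≤ t) :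
    ∀ l : List Nat, l.Nodup → t.toNat ∈ l →
      (l.filter (fun x : Nat => !decide ((x : Int) ∈ PySem.Set.add S t))).length + 1 =
      (l.filter (fun x : Nat => !decide ((x : Int) ∈ S))).length := by
  intro l
  induction l with
  | nil => intro _ h; cases h
  | cons x tl ih =>
    intro hnd hmem
    rw [List.nodup_cons] at hnd
    by_cases hx : x = t.toNat
    · have hxt : ((x : Int)) = t := by rw [hx]; exact Int.toNat_of_nonneg h0
      have hnew : ((x : Int) ∈ PySem.Set.add S t) := by
        rw [PySem.Set.mem_add]; right; exact hxt
      have hold : ¬ ((x : Int) ∈ S) := by rw [hxt]; exact ht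
      have hcongr : tl.filter (fun y : Nat => !decide ((y : Int) ∈ PySem.Set.add S t)) =
          tl.filter (fun y : Nat => !decide ((y : Int) ∈ S)) := by
        apply List.filter_congr
        intro y hy
        have hyt : ((y : Int)) ≠ t := by
          intro h
          have hy' : y = t.toNat := by rw [← h, Int.toNat_natCast]
          rw [← hx] at hy'
          exact hnd.1 (hy' ▸ hy)
        simp [PySem.Set.mem_add, hyt]
      simp only [List.filter_cons, hnew, hold, decide_true, decide_false,
        Bool.not_true, Bool.not_false, if_true, hcongr]
      simp
    · have hmem' : t.toNat ∈ tl := by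
        cases hmem with
        | head => exact absurd rfl hx
        | tail _ h => exact h
      have hxt : ((x : Int)) ≠ t := by
        intro h; exact hx (by rw [← h]; exact (Int.toNat_natCast x).symm)
      have heq : ((x : Int) ∈ PySem.Set.add S t) ↔ ((x : Int) ∈ S) := by
        rw [PySem.Set.mem_add]; simp [hxt]
      have hrec := ih hnd.2 hmem'
      by_cases hin : (x : Int) ∈ S
      · simpa [List.filter_cons, heq.mpr hin, hin] using hrec
      · have hnin : ¬ ((x : Int) ∈ PySem.Set.add S t) := fun h => hin (heq.mp h)
        simp only [List.filter_cons, hnin, hin, decide_false, Bool.not_false, if_true,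
          List.length_cons]
        omega

theorem pvMissing_add (S : PySem.Set Int) (t N : Int)
    (ht : t ∉ S) (h0 : 0 ≤ t) (hN : t ≤ N) :
    pvMissing (PySem.Set.add S t) N + 1 = pvMissing S N := by
  apply pvMissing_aux S t ht h0
  · exact List.nodup_range
  · rw [List.mem_range]; omega

-- One stack frame of B computes exactly A's recursion on that frame, with the rest of the
-- stack processed afterwards.
theorem pv_goB_frame (N : Int) (hN : 1 ≤ N) :
    ∀ (f : Nat) (S : PySem.Set Int) (l : Int)
      (rest : List (Nat × PySem.Set Int × Int)) (total : Int),
      pvMissing S N < f →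
      e265_goB ((f, S, l) :: rest) total N = e265_goB rest (total + e265_goA f S l N) N := by
  intro f
  induction f with
  | zero => intro _ _ _ _ h; exact absurd h (Nat.not_lt_zero _)
  | succ f ih =>
    intro S l rest total hfuel
    by_cases hlen : ((List.length S : Int)) = N
    · simp [e265_goB, e265_goA, PySem.Set.len, hlen]
    · have hband := pvBand_bounds (l * 2) (N - 1) (by omega)
      set t := PySem.Int.band (l * 2) (N - 1) with htdef
      by_cases hct : t ∈ S
      · by_cases hct1 : (t + 1) ∈ S
        · simp [e265_goB, e265_goA, PySem.Set.len, hlen, ← htdef, hct, hct1]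
        · have hm1 := pvMissing_add S (t + 1) N hct1 (by omega) (by omega)
          rw [show e265_goB ((f + 1, S, l) :: rest) total N =
              e265_goB ((f, PySem.Set.add S (t + 1), l * 2 + 1) :: rest) total N by
            simp [e265_goB, PySem.Set.len, hlen, ← htdef, hct, hct1]]
          rw [ih _ _ _ _ (by omega)]
          have hA : e265_goA (f + 1) S l N =
              e265_goA f (PySem.Set.add S (t + 1)) (l * 2 + 1) N := by
            simp [e265_goA, PySem.Set.len, hlen, ← htdef, hct, hct1]
          rw [hA]
      · have hm := pvMissing_add S t N hct (by omega) (by omega)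
        by_cases hct1 : (t + 1) ∈ S
        · rw [show e265_goB ((f + 1, S, l) :: rest) total N =
              e265_goB ((f, PySem.Set.add S t, l * 2) :: rest) total N by
            simp [e265_goB, PySem.Set.len, hlen, ← htdef, hct, hct1]]
          rw [ih _ _ _ _ (by omega)]
          have hA : e265_goA (f + 1) S l N = e265_goA f (PySem.Set.add S t) (l * 2) N := by
            simp [e265_goA, PySem.Set.len, hlen, ← htdef, hct, hct1]
          rw [hA]
        · have hm1 := pvMissing_add S (t + 1) N hct1 (by omega) (by omega)
          rw [show e265_goB ((f + 1, S, l) :: rest) total N =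
              e265_goB ((f, PySem.Set.add S t, l * 2) ::
                        (f, PySem.Set.add S (t + 1), l * 2 + 1) :: rest) total N by
            simp [e265_goB, PySem.Set.len, hlen, ← htdef, hct, hct1]]
          rw [ih _ _ _ _ (by omega), ih _ _ _ _ (by omega)]
          have hA : e265_goA (f + 1) S l N =
              e265_goA f (PySem.Set.add S t) (l * 2) N +
              e265_goA f (PySem.Set.add S (t + 1)) (l * 2 + 1) N := by
            simp [e265_goA, PySem.Set.len, hlen, ← htdef, hct, hct1]
          rw [hA]; ring_nf

-- ===== VERDICT (by name: the statement is the Claim_ definition above) =====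
theorem e265_recurse_spec : Claim_equal_e265_recurse := by
  intro S last N _ hpre
  unfold Spec_e265_recurse e265_recurse e265_recurse_alt
  by_cases hN : 1 ≤ N
  · have hm : pvMissing (PySem.Set.ofList S) N < N.toNat + 2 := by
      have := pvMissing_le (PySem.Set.ofList S) N; omega
    rw [pv_goB_frame N hN (N.toNat + 2) (PySem.Set.ofList S) last [] 0 hm]
    simp [e265_goB]
  · rcases hpre with h | h | ⟨hb1, hb2⟩
    · exact absurd h hN
    · -- immediate base case: both sides return `last` at once
      simp [e265_goA, e265_goB, PySem.Set.len] at h ⊢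
      simp [h]
    · -- both first candidates blocked: both sides return 0 (or `last` if len(S) == N)
      have hb1' : PySem.Int.band (2 * last) (N - 1) ∈ PySem.Set.ofList S :=
        (PySem.Set.mem_ofList S _).mpr hb1
      have hb2' : PySem.Int.band (2 * last) (N - 1) + 1 ∈ PySem.Set.ofList S :=
        (PySem.Set.mem_ofList S _).mpr hb2
      have h2l : last * 2 = 2 * last := by ring
      by_cases hlen : ((List.length (PySem.Set.ofList S) : Int)) = N
      · simp [e265_goA, e265_goB, PySem.Set.len, hlen]
      · simp [e265_goA, e265_goB, PySem.Set.len, hlen, h2l, hb1', hb2']
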